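-- pv_equiv track=rewrite | github.com/lacithelaci/oktatas | deik_verseny/divisiors.py | osztok
-- ===== SOURCE A (Python) =====
-- def osztok(a):
--     paros = sum(1 for i in range(1, a + 1) if a % i == 0 and i % 2 == 0)
--     paratla = sum(1 for i in range(1, a + 1) if a % i == 0 and i % 2 == 1)
--
--     if paros == paratla:
--         return 0
--     elif paros > paratla:
--         return 2
--     return 1
-- ===== SOURCE B (Python) =====
-- def osztok(a):
--     # Closed form: for a >= 1 write a = 2^k * m with m odd; the divisor counts are
--     # even = k*d(m), odd = d(m), so the answer depends only on a mod 4.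
--     if a <= 0:
--         return 0
--     if a % 2 == 1:
--         return 1
--     return 0 if a % 4 == 2 else 2
-- ===== Notes on version B (the rewrite author's own statement) =====
-- stated objective: faster
-- what changed: Replaced the O(a) scan over all candidate divisors with an O(1) closed form: the even/odd divisor counts of a = 2^k*m (m odd) are k*d(m) and d(m), so the answer is determined by a mod 4 (and a <= 0 gives 0, matching A's empty range).
import Mathlib
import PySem

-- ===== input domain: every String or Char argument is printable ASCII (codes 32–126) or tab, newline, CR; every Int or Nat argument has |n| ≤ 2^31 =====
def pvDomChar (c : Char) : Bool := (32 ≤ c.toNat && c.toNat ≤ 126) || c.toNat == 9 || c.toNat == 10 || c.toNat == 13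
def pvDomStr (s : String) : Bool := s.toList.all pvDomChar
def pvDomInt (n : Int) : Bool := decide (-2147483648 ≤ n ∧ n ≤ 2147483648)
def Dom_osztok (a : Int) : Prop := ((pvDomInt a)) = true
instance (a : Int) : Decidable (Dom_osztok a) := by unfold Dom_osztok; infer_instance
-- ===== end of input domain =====

-- B replaces A's O(a) scan over all candidate divisors by an O(1) case split on sign and a mod 4 (for a = 2^k*m, m odd, the even/odd divisor counts are k*d(m) and d(m)).


-- ===== PORT A =====
-- paros = sum(1 for i in range(1, a+1) if a % i == 0 and i % 2 == 0); paratla likewise with i % 2 == 1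
def osztok (a : Int) : Int :=
  let paros : Int :=
    ((PySem.List.pyRange 1 (a + 1) 1).filter
      (fun i => PySem.Int.mod a i == 0 && PySem.Int.mod i 2 == 0)).length
  let paratla : Int :=
    ((PySem.List.pyRange 1 (a + 1) 1).filter
      (fun i => PySem.Int.mod a i == 0 && PySem.Int.mod i 2 == 1)).length
  if paros = paratla then 0
  else if paros > paratla then 2
  else 1

-- ===== PORT B =====
def osztok_alt (a : Int) : Int :=
  if a ≤ 0 then 0
  else if PySem.Int.mod a 2 = 1 then 1
  else if PySem.Int.mod a 4 = 2 then 0 else 2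

-- ===== PRECONDITION & SPEC =====
def Spec_osztok (a : Int) (out : Int) : Prop := out = osztok_alt a
instance (a : Int) (out : Int) : Decidable (Spec_osztok a out) := by unfold Spec_osztok; infer_instance

-- ===== CLAIM (what is proved, stated in full; the proofs are below) =====
def Claim_equal_osztok : Prop := ∀ (a : Int), Dom_osztok a → Spec_osztok a (osztok a)

-- ===== LEMMAS AND PROOFS =====

-- A's 0/1-sum over range(1, a+1) counts exactly the divisors of a.toNat with the given parity.
theorem pv_mem_count (a : Int) (ha : 1 ≤ a) (r : Int) (rn : ℕ) (hr : r = (rn : Int)) :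
    (((PySem.List.pyRange 1 (a+1) 1).filter
        (fun i => PySem.Int.mod a i == 0 && PySem.Int.mod i 2 == r)).length : Int)
    = ((a.toNat.divisors.filter (fun d => d % 2 = rn)).card : Int) := by
  have hnd : ((PySem.List.pyRange 1 (a+1) 1).filter
        (fun i => PySem.Int.mod a i == 0 && PySem.Int.mod i 2 == r)).Nodup :=
    (PySem.List.nodup_pyRange_one 1 (a+1)).filter _
  rw [← List.toFinset_card_of_nodup hnd]
  have himg : ((PySem.List.pyRange 1 (a+1) 1).filter
        (fun i => PySem.Int.mod a i == 0 && PySem.Int.mod i 2 == r)).toFinset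
      = (a.toNat.divisors.filter (fun d => d % 2 = rn)).image (fun d : ℕ => (d : Int)) := by
    ext i
    simp only [List.mem_toFinset, List.mem_filter, PySem.List.mem_pyRange_one,
      Finset.mem_image, Finset.mem_filter, Nat.mem_divisors, Bool.and_eq_true, beq_iff_eq,
      PySem.Int.mod_eq_zero_iff_dvd]
    constructor
    · rintro ⟨⟨h1, h2⟩, hdvd, hpar⟩
      refine ⟨i.toNat, ⟨⟨?_, by omega⟩, ?_⟩, Int.toNat_of_nonneg (by omega)⟩
      · rw [← Int.natCast_dvd_natCast, Int.toNat_of_nonneg (by omega : (0:ℤ) ≤ i),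
          Int.toNat_of_nonneg (by omega : (0:ℤ) ≤ a)]
        exact hdvd
      · rw [PySem.Int.mod_eq_emod_of_pos (by norm_num : (0:ℤ) < 2)] at hpar
        omega
    · rintro ⟨d, ⟨⟨hdvd, hn0⟩, hpar⟩, hid⟩
      have hd1 : 1 ≤ d := Nat.pos_of_dvd_of_pos hdvd (by omega)
      have hdn : d ≤ a.toNat := Nat.le_of_dvd (by omega) hdvd
      refine ⟨⟨by omega, by omega⟩, ?_, ?_⟩
      · rw [← hid]
        have hA : a = (a.toNat : Int) := (Int.toNat_of_nonneg (by omega)).symm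
        rw [hA]
        exact_mod_cast hdvd
      · rw [PySem.Int.mod_eq_emod_of_pos (by norm_num : (0:ℤ) < 2), ← hid, hr]
        omega
  rw [himg, Finset.card_image_of_injective _ (fun x y h => by exact_mod_cast h)]

-- For even n, the even divisors of n are in bijection (d ↦ 2d) with all divisors of n/2.
theorem pv_evens_card {n : ℕ} (hn : 0 < n) (h2 : 2 ∣ n) :
    (n.divisors.filter (fun d => d % 2 = 0)).card = (n/2).divisors.card := by
  have hm : 0 < n / 2 := Nat.div_pos (Nat.le_of_dvd hn h2) (by norm_num)
  symm
  refine Finset.card_bij' (fun e _ => 2 * e) (fun d _ => d / 2) ?_ ?_ ?_ ?_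
  · intro e he
    simp only [Nat.mem_divisors] at he
    simp only [Finset.mem_filter, Nat.mem_divisors]
    refine ⟨⟨?_, by omega⟩, by omega⟩
    have : n = 2 * (n / 2) := (Nat.two_mul_div_two_of_even (even_iff_two_dvd.mpr h2)).symm
    rw [this]
    exact mul_dvd_mul_left 2 he.1
  · intro d hd
    simp only [Finset.mem_filter, Nat.mem_divisors] at hd
    simp only [Nat.mem_divisors]
    obtain ⟨⟨hdvd, hn0⟩, hpar⟩ := hd
    refine ⟨?_, by omega⟩
    have hd2 : d = 2 * (d / 2) := by omega
    have hn2 : n = 2 * (n / 2) := by omega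
    rw [hd2, hn2] at hdvd
    exact (mul_dvd_mul_iff_left (by norm_num : (2:ℕ) ≠ 0)).mp hdvd
  · intro e he
    show 2 * e / 2 = e
    omega
  · intro d hd
    simp only [Finset.mem_filter] at hd
    show 2 * (d / 2) = d
    omega

-- For even n, the odd divisors of n are exactly the odd divisors of n/2.
theorem pv_odds_eq {n : ℕ} (hn : 0 < n) (h2 : 2 ∣ n) :
    n.divisors.filter (fun d => d % 2 = 1) = (n/2).divisors.filter (fun d => d % 2 = 1) := by
  have hm : 0 < n / 2 := Nat.div_pos (Nat.le_of_dvd hn h2) (by norm_num)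
  ext d
  simp only [Finset.mem_filter, Nat.mem_divisors]
  constructor
  · rintro ⟨⟨hdvd, _⟩, hpar⟩
    refine ⟨⟨?_, by omega⟩, hpar⟩
    have hcop : d.Coprime 2 := Odd.coprime_two_right (Nat.odd_iff.mpr hpar)
    have hmul : d ∣ 2 * (n / 2) := by
      have : n = 2 * (n / 2) := by omega
      rwa [this] at hdvd
    exact hcop.dvd_of_dvd_mul_left hmul
  · rintro ⟨⟨hdvd, _⟩, hpar⟩
    exact ⟨⟨hdvd.trans (Nat.div_dvd_of_dvd h2), by omega⟩, hpar⟩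

-- For odd m, every divisor is odd.
theorem pv_odd_all {m : ℕ} (hmo : m % 2 = 1) :
    m.divisors.filter (fun d => d % 2 = 1) = m.divisors := by
  refine Finset.filter_true_of_mem ?_
  intro d hd
  rw [Nat.mem_divisors] at hd
  rcases Nat.even_or_odd d with he | ho
  · exfalso
    obtain ⟨hdvd, _⟩ := hd
    have : 2 ∣ m := (even_iff_two_dvd.mp he).trans hdvd
    omega
  · exact Nat.odd_iff.mp ho

theorem osztok_spec : Claim_equal_osztok := by
  intro a _
  show osztok a = osztok_alt a
  by_cases hle : a ≤ 0
  · simp only [osztok, osztok_alt, PySem.List.pyRange_one_eq_nil (by omega : a + 1 ≤ 1)]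
    simp [hle]
  · have ha : 1 ≤ a := by omega
    have hE := pv_mem_count a ha 0 0 (by norm_num)
    have hO := pv_mem_count a ha 1 1 (by norm_num)
    have hn : 0 < a.toNat := by omega
    have ha2 : PySem.Int.mod a 2 = a % 2 :=
      PySem.Int.mod_eq_emod_of_pos (by norm_num : (0:ℤ) < 2)
    have ha4 : PySem.Int.mod a 4 = a % 4 :=
      PySem.Int.mod_eq_emod_of_pos (by norm_num : (0:ℤ) < 4)
    have hA : a = (a.toNat : Int) := (Int.toNat_of_nonneg (by omega)).symm
    simp only [osztok, osztok_alt, hE, hO, ha2, ha4, if_neg (by omega : ¬ a ≤ 0)]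
    rcases Nat.even_or_odd a.toNat with hev | hod
    · -- a even
      have h2 : 2 ∣ a.toNat := even_iff_two_dvd.mp hev
      have hm : 0 < a.toNat / 2 := Nat.div_pos (Nat.le_of_dvd hn h2) (by norm_num)
      have hEc : (a.toNat.divisors.filter (fun d => d % 2 = 0)).card
          = (a.toNat/2).divisors.card := pv_evens_card hn h2
      have hOc : a.toNat.divisors.filter (fun d => d % 2 = 1)
          = (a.toNat/2).divisors.filter (fun d => d % 2 = 1) := pv_odds_eq hn h2
      by_cases h4 : a.toNat % 4 = 2
      · -- a ≡ 2 (mod 4): n/2 odd, counts equal, both return 0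
        have hmo : a.toNat / 2 % 2 = 1 := by omega
        have : a.toNat.divisors.filter (fun d => d % 2 = 1) = (a.toNat/2).divisors := by
          rw [hOc, pv_odd_all hmo]
        rw [this, hEc]
        have hb2 : ¬ a % 2 = 1 := by omega
        have hb4 : a % 4 = 2 := by omega
        simp [hb2, hb4]
      · -- 4 ∣ a: n/2 even, strictly more even divisors, both return 2
        have h40 : a.toNat % 4 = 0 := by omega
        have hmev : a.toNat / 2 % 2 = 0 := by omega
        have hlt : ((a.toNat/2).divisors.filter (fun d => d % 2 = 1)).card
            < (a.toNat/2).divisors.card := by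
          refine Finset.card_lt_card ?_
          rw [Finset.ssubset_iff_of_subset (Finset.filter_subset _ _)]
          refine ⟨2, ?_, ?_⟩
          · rw [Nat.mem_divisors]
            exact ⟨by omega, by omega⟩
          · simp
        rw [hOc, hEc]
        have hb2 : ¬ a % 2 = 1 := by omega
        have hb4 : ¬ a % 4 = 2 := by omega
        have hne : ¬ (((a.toNat/2).divisors.card : Int)
            = (((a.toNat/2).divisors.filter (fun d => d % 2 = 1)).card : Int)) := by
          exact_mod_cast Nat.ne_of_gt hlt
        have hgt : (((a.toNat/2).divisors.card : Int))
            > (((a.toNat/2).divisors.filter (fun d => d % 2 = 1)).card : Int) := by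
          exact_mod_cast hlt
        simp [hb2, hb4, hne, hgt]
    · -- a odd: no even divisors, at least one odd divisor, both return 1
      have hodm : a.toNat % 2 = 1 := Nat.odd_iff.mp hod
      have hEe : a.toNat.divisors.filter (fun d => d % 2 = 0) = ∅ := by
        refine Finset.filter_eq_empty_iff.mpr ?_
        intro d hd
        rw [Nat.mem_divisors] at hd
        intro hpar
        have : 2 ∣ a.toNat := (Nat.dvd_of_mod_eq_zero hpar).trans hd.1
        omega
      have hOp : 0 < (a.toNat.divisors.filter (fun d => d % 2 = 1)).card := by
        refine Finset.card_pos.mpr ⟨1, ?_⟩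
        simp only [Finset.mem_filter, Nat.mem_divisors]
        exact ⟨⟨one_dvd _, by omega⟩, by norm_num⟩
      rw [hEe]
      have hb2 : a % 2 = 1 := by omega
      have hne : ¬ ((0:Int) = ((a.toNat.divisors.filter (fun d => d % 2 = 1)).card : Int)) := by
        exact_mod_cast Nat.ne_of_lt hOp
      have hngt : ¬ ((0:Int) > ((a.toNat.divisors.filter (fun d => d % 2 = 1)).card : Int)) := by
        omega
      simp [hb2, hne, hngt]
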